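-- pv_equiv track=rewrite | github.com/toxine4610/codingpractice | dcp21.py | dcp21
-- ===== SOURCE A (Python) =====
-- def dcp21(times):
--     start_times = [(t[0], 1) for t in times]
--     end_times   = [(t[1],-1) for t in times]
--     eventStamps = [t[1] for t in sorted(start_times+end_times, key = lambda t: t[0] )]
--
--     maxRoom = 1
--     room    = 0
--
--     for event in eventStamps:
--         room += event
--         if room > maxRoom:
--             maxRoom =  room
--     return maxRoom
--
-- times = [(0, 50), (55, 59), (60, 150)]
-- ===== SOURCE B (Python) =====
-- def dcp21(times):
--     starts = sorted(t[0] for t in times)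
--     ends = sorted(t[1] for t in times)
--     n = len(starts)
--     room = 0
--     maxRoom = 1
--     i = 0
--     j = 0
--     while i < n:
--         if j >= n or starts[i] <= ends[j]:
--             room += 1
--             i += 1
--             if room > maxRoom:
--                 maxRoom = room
--         else:
--             room -= 1
--             j += 1
--     return maxRoom
-- ===== Notes on version B (the rewrite author's own statement) =====
-- stated objective: alternative
-- what changed: Replaces A's tagged-event list (concatenate (+1)/(-1) stamps, one stable sort of 2n pairs, fold) by the classic two-pointer sweep over two separately sorted start and end lists, with <= tie-breaking reproducing A's stable-sort order.
import Mathlib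
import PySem

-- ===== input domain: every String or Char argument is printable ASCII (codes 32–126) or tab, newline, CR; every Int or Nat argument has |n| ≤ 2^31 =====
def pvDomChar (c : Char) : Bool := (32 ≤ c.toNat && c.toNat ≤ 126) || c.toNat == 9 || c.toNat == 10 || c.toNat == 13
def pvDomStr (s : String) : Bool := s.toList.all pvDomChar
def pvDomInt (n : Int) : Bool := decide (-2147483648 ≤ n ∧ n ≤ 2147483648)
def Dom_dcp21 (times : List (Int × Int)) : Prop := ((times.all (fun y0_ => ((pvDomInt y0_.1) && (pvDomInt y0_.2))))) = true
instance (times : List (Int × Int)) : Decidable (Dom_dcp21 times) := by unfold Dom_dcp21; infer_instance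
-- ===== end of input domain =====

-- B replaces A's single stable sort of tagged (+1)/(-1) event pairs by a two-pointer sweep
-- over separately sorted start and end lists (objective: alternative algorithm, same result).

-- ===== PORT A =====
def dcp21 (times : List (Int × Int)) : Int :=
  let start_times := times.map (fun t => (t.1, (1 : Int)))
  let end_times := times.map (fun t => (t.2, (-1 : Int)))
  let eventStamps :=
    (PySem.List.sorted (start_times ++ end_times) (fun t => t.1) false).map (fun t => t.2)
  let st := eventStamps.foldl
    (fun (st : Int × Int) event =>
      let room := st.1 + event
      (room, if room > st.2 then room else st.2))
    (0, 1)
  st.2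

-- ===== PORT B =====
-- the while-loop of Source B: consuming a head = advancing the corresponding pointer
def dcp21AltLoop (starts ends : List Int) (room maxRoom : Int) : Int :=
  match starts, ends with
  | [], _ => maxRoom
  | _ :: ss, [] =>
      let room' := room + 1
      dcp21AltLoop ss [] room' (if room' > maxRoom then room' else maxRoom)
  | s :: ss, e :: es =>
      if s ≤ e then
        let room' := room + 1
        dcp21AltLoop ss (e :: es) room' (if room' > maxRoom then room' else maxRoom)
      else
        dcp21AltLoop (s :: ss) es (room - 1) maxRoom
termination_by starts.length + ends.length

def dcp21_alt (times : List (Int × Int)) : Int :=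
  let starts := PySem.List.sorted (times.map (fun t => t.1)) (fun x => x) false
  let ends := PySem.List.sorted (times.map (fun t => t.2)) (fun x => x) false
  dcp21AltLoop starts ends 0 1

-- ===== PRECONDITION & SPEC =====
def Spec_dcp21 (times : List (Int × Int)) (out : Int) : Prop := out = dcp21_alt times
instance (times : List (Int × Int)) (out : Int) : Decidable (Spec_dcp21 times out) := by unfold Spec_dcp21; infer_instance

-- ===== CLAIM (what is proved, stated in full; the proofs are below) =====
def Claim_equal_dcp21 : Prop := ∀ (times : List (Int × Int)), Dom_dcp21 times → Spec_dcp21 times (dcp21 times)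

-- ===== LEMMAS AND PROOFS =====

-- merge of two lists of (time, sign) pairs, left-preferring on equal times:
-- exactly the interleaving a stable sort of the concatenation produces
def pvMerge2 (p q : List (Int × Int)) : List (Int × Int) :=
  match p, q with
  | [], q => q
  | p, [] => p
  | a :: p', b :: q' =>
      if a.1 ≤ b.1 then a :: pvMerge2 p' (b :: q') else b :: pvMerge2 (a :: p') q'
termination_by p.length + q.length

theorem pvMerge2_nil_right (p : List (Int × Int)) : pvMerge2 p [] = p := by
  cases p <;> simp [pvMerge2]

theorem insertBy_eq_pvMerge2_singleton (p : List (Int × Int)) (y : Int × Int) :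
    PySem.List.insertBy (fun a b => decide (a.1 < b.1)) y p = pvMerge2 p [y] := by
  induction p with
  | nil => simp [pvMerge2, PySem.List.insertBy]
  | cons a p' ih =>
      simp only [PySem.List.insertBy, pvMerge2]
      by_cases h : y.1 < a.1
      · simp [h, not_le.mpr h]
      · simp [h, not_lt.mp h, ih]

-- inserting into a merge = merging with the insertion done on the right list
theorem insertBy_pvMerge2 (p q : List (Int × Int)) (y : Int × Int) :
    PySem.List.insertBy (fun a b => decide (a.1 < b.1)) y (pvMerge2 p q)
      = pvMerge2 p (PySem.List.insertBy (fun a b => decide (a.1 < b.1)) y q) := by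
  induction p, q using pvMerge2.induct with
  | case1 q => simp [pvMerge2]
  | case2 p _ =>
      rw [pvMerge2_nil_right]
      have h0 : PySem.List.insertBy (fun a b => decide (a.1 < b.1)) y ([] : List (Int × Int)) = [y] := rfl
      rw [h0]
      exact insertBy_eq_pvMerge2_singleton p y
  | case3 a p' b q' hle ih =>
      simp only [pvMerge2, if_pos hle, PySem.List.insertBy]
      by_cases hy : y.1 < a.1
      · have hyb : y.1 < b.1 := lt_of_lt_of_le hy hle
        simp [hy, hyb, pvMerge2, not_le.mpr hy, hle]
      · simp only [decide_eq_true_eq, hy, ih, PySem.List.insertBy]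
        by_cases hyb : y.1 < b.1
        · simp [hyb, pvMerge2, not_lt.mp hy]
        · simp [hyb, pvMerge2, hle]
  | case4 a p' b q' hle ih =>
      have hba : b.1 < a.1 := not_le.mp hle
      simp only [pvMerge2, if_neg hle, PySem.List.insertBy]
      by_cases hyb : y.1 < b.1
      · have hya : ¬ a.1 ≤ y.1 := by omega
        simp [hyb, pvMerge2, hya, hle]
      · simp [hyb, ih, pvMerge2, hle]

theorem foldl_ins_pvMerge2 (ys : List (Int × Int)) (p q : List (Int × Int)) :
    ys.foldl (fun acc x => PySem.List.insertBy (fun a b => decide (a.1 < b.1)) x acc) (pvMerge2 p q)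
      = pvMerge2 p (ys.foldl (fun acc x => PySem.List.insertBy (fun a b => decide (a.1 < b.1)) x acc) q) := by
  induction ys generalizing q with
  | nil => rfl
  | cons y ys ih =>
      simp only [List.foldl_cons, insertBy_pvMerge2, ih]

-- stable sort of a concatenation is the left-preferring merge of the two sorts
theorem sorted_append_eq_pvMerge2 (xs ys : List (Int × Int)) :
    PySem.List.sorted (xs ++ ys) (fun t => t.1) false
      = pvMerge2 (PySem.List.sorted xs (fun t => t.1) false)
                 (PySem.List.sorted ys (fun t => t.1) false) := by
  rw [PySem.List.sorted_eq_foldl_insertBy, PySem.List.sorted_eq_foldl_insertBy,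
      PySem.List.sorted_eq_foldl_insertBy, List.foldl_append]
  have h := foldl_ins_pvMerge2 ys (List.foldl (fun acc x => PySem.List.insertBy (fun a b => decide (a.1 < b.1)) x acc) [] xs) []
  rw [pvMerge2_nil_right] at h
  exact h

theorem insertBy_map_const (c : Int) (x : Int) (l : List Int) :
    PySem.List.insertBy (fun a b => decide (a.1 < b.1)) (x, c) (l.map (fun k => (k, c)))
      = (PySem.List.insertBy (fun a b => decide (a < b)) x l).map (fun k => (k, c)) := by
  induction l with
  | nil => rfl
  | cons a l ih =>
      simp only [List.map_cons, PySem.List.insertBy]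
      by_cases h : x < a
      · simp [h]
      · simp [h, ih]

-- sorting pairs with a constant second component = sorting the keys and re-tagging
theorem sorted_map_const (c : Int) (l : List Int) :
    PySem.List.sorted (l.map (fun k => (k, c))) (fun t => t.1) false
      = (PySem.List.sorted l (fun x => x) false).map (fun k => (k, c)) := by
  rw [PySem.List.sorted_eq_foldl_insertBy, PySem.List.sorted_eq_foldl_insertBy]
  have : ∀ (l : List Int) (m : List Int),
      List.foldl (fun acc x => PySem.List.insertBy (fun a b => decide (a.1 < b.1)) x acc)
        (m.map (fun k => (k, c))) (l.map (fun k => (k, c)))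
      = (List.foldl (fun acc x => PySem.List.insertBy (fun a b => decide (a < b)) x acc) m l).map
          (fun k => (k, c)) := by
    intro l
    induction l with
    | nil => intro m; rfl
    | cons a l ih =>
        intro m
        simp only [List.map_cons, List.foldl_cons, insertBy_map_const, ih]
  simpa using this l []

-- trailing end-events only decrease room: the running maximum is unchanged
theorem foldl_stamps_ends (es : List Int) (room maxRoom : Int) (h : room ≤ maxRoom) :
    (((es.map (fun k => (k, (-1 : Int)))).map (fun t => t.2)).foldl
      (fun (st : Int × Int) event =>
        let room := st.1 + event
        (room, if room > st.2 then room else st.2)) (room, maxRoom)).2 = maxRoom := by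
  induction es generalizing room with
  | nil => rfl
  | cons e es ih =>
      simp only [List.map_cons, List.foldl_cons]
      have hno : ¬ (room + (-1) > maxRoom) := by omega
      simpa [hno] using ih (room - 1) (by omega)

-- A's fold over the merged stamps = B's two-pointer loop (invariant: room ≤ maxRoom)
theorem foldl_merge_eq_altLoop (ss es : List Int) (room maxRoom : Int)
    (h : room ≤ maxRoom) :
    (((pvMerge2 (ss.map (fun k => (k, (1 : Int)))) (es.map (fun k => (k, (-1 : Int))))).map
        (fun t => t.2)).foldl
      (fun (st : Int × Int) event =>
        let room := st.1 + event
        (room, if room > st.2 then room else st.2)) (room, maxRoom)).2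
    = dcp21AltLoop ss es room maxRoom := by
  induction ss, es, room, maxRoom using dcp21AltLoop.induct with
  | case1 es room maxRoom =>
      rw [dcp21AltLoop]
      simpa [pvMerge2] using foldl_stamps_ends es room maxRoom h
  | case2 room maxRoom head ss r' ih =>
      rw [dcp21AltLoop]
      have hr : r' = room + 1 := rfl
      simp only [hr] at ih
      have h' : room + 1 ≤ (if room + 1 > maxRoom then room + 1 else maxRoom) := by
        split <;> omega
      simpa [pvMerge2_nil_right] using ih h'
  | case3 room maxRoom s ss e es hle r' ih =>
      rw [dcp21AltLoop]
      have hr : r' = room + 1 := rfl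
      simp only [hr] at ih
      have hp : ((s, (1 : Int))).1 ≤ ((e, (-1 : Int))).1 := by simpa using hle
      have h' : room + 1 ≤ (if room + 1 > maxRoom then room + 1 else maxRoom) := by
        split <;> omega
      simpa [pvMerge2, hp, hle] using ih h'
  | case4 room maxRoom s ss e es hle ih =>
      rw [dcp21AltLoop]
      have hp : ¬ ((s, (1 : Int))).1 ≤ ((e, (-1 : Int))).1 := by simpa using hle
      have h' : room - 1 ≤ maxRoom := by omega
      have hno : ¬ (room + (-1) > maxRoom) := by omega
      simpa [pvMerge2, hp, hle, hno, sub_eq_add_neg] using ih h'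

-- ===== VERDICT (by name: the statement is the Claim_ definition above) =====
theorem dcp21_spec : Claim_equal_dcp21 := by
  intro times _
  unfold Spec_dcp21 dcp21 dcp21_alt
  simp only []
  have hmap1 : times.map (fun t => (t.1, (1 : Int))) = (times.map (fun t => t.1)).map (fun k => (k, (1 : Int))) := by
    simp [List.map_map]
  have hmap2 : times.map (fun t => (t.2, (-1 : Int))) = (times.map (fun t => t.2)).map (fun k => (k, (-1 : Int))) := by
    simp [List.map_map]
  rw [hmap1, hmap2, sorted_append_eq_pvMerge2, sorted_map_const, sorted_map_const]
  exact foldl_merge_eq_altLoop _ _ 0 1 (by norm_num)
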